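-- pv_equiv track=rewrite | github.com/berkecanrizai/privacy-assignments | Privacy HW-Folder/Privacy HW-1/skeleton.py | countChildren
-- ===== SOURCE A (Python) =====
-- def isLeaf(nd, dc):
--     return not (nd in [v for k, v in dc.items()])
--
-- def countChildren(DGHs, dc, name):
--     if isLeaf(name, dc):
--         return 1
--     res = 0
--     chls = []
--     for k in dc:
--         val = dc[k]
--         if val == name and name != k:
--             chls.append(k)
--
--     tt = 0
--     for i in chls:
--         tt += countChildren(DGHs, dc, i)
--
--     return res + tt
-- ===== SOURCE B (Python) =====
-- def countChildren(DGHs, dc, name):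
--     # Iterative level-by-level frontier walk over a precomputed child index and
--     # leaf set.  A simple parent path in dc has at most len(dc) edges, so
--     # len(dc) + 1 levels cover the whole subtree (the frontier is empty after).
--     vals = set(dc.values())
--     children = {}
--     for k, v in dc.items():
--         if k != v:
--             children.setdefault(v, []).append(k)
--     total = 0
--     frontier = [name]
--     for _ in range(len(dc) + 1):
--         nxt = []
--         for n in frontier:
--             if n not in vals:
--                 total += 1
--             else:
--                 nxt.extend(children.get(n, []))
--         frontier = nxt
--     return total
-- ===== Notes on version B (the rewrite author's own statement) =====
-- stated objective: alternative
-- what changed: B is iterative, not recursive: it precomputes the leaf set and a parent->children index once, then expands a frontier list level by level (len(dc)+1 levels bound the tree depth), accumulating a leaf total, instead of A's top-down recursion that rescans the whole dict at every visited node.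
import Mathlib
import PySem

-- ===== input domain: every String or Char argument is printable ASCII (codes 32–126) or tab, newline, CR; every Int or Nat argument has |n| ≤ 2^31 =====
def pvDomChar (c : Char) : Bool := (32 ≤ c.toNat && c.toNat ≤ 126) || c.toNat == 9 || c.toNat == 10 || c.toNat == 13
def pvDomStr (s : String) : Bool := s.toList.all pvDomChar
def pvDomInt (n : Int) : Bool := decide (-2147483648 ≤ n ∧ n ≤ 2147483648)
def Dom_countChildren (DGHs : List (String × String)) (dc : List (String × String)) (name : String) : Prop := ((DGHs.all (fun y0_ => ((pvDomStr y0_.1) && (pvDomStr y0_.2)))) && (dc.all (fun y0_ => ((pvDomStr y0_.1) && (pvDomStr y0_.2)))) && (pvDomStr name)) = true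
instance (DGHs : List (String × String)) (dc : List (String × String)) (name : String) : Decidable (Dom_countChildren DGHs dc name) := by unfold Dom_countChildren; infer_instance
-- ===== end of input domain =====

-- B replaces A's top-down recursion (which rescans the whole dict at every visited
-- node) by an iterative level-by-level frontier walk over a precomputed child
-- index and leaf set (objective: alternative).

-- ===== PORT A =====
def isLeaf (nd : String) (dc : List (String × String)) : Bool :=
  ! ((dc.map (fun kv => kv.2)).contains nd)

-- recursion depth of the Python is bounded by |dc| + 1 on every input Pre_ admits
-- (name not on a parent-cycle of length ≥ 2), so fuel |dc| + 1 is exact there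
def countChildrenFuel (DGHs : List (String × String)) (dc : List (String × String)) :
    Nat → String → Int
  | 0, _ => 0
  | fuel + 1, name =>
    if isLeaf name dc then 1
    else
      let res : Int := 0
      -- 'for k in dc: val = dc[k]'; k is a key of dc, so dc[k] never raises and getD is exact
      let chls : List String :=
        (dc.map (fun kv => kv.1)).foldl
          (fun acc k =>
            let val := (PySem.Dict.mk dc).getD k ""
            if val == name && name != k then acc ++ [k] else acc) []
      let tt : Int := chls.foldl (fun tt i => tt + countChildrenFuel DGHs dc fuel i) 0
      res + tt

def countChildren (DGHs : List (String × String)) (dc : List (String × String)) (name : String) : Int :=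
  countChildrenFuel DGHs dc (dc.length + 1) name

-- ===== PORT B =====
-- one level of the frontier loop: 'nxt = []; for n in frontier: …' over state (frontier, total)
def stepFrontier (vals : PySem.Set String) (children : PySem.Dict String (List String))
    (st : List String × Int) : List String × Int :=
  st.1.foldl (fun acc n =>
    if ! PySem.Set.contains vals n then (acc.1, acc.2 + 1)
    else (acc.1 ++ children.getD n [], acc.2)) ([], st.2)

def countChildren_alt (DGHs : List (String × String)) (dc : List (String × String)) (name : String) : Int :=
  let vals : PySem.Set String := PySem.Set.ofList (dc.map (fun kv => kv.2))
  let children : PySem.Dict String (List String) :=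
    dc.foldl (fun d kv =>
      if kv.1 != kv.2 then d.modify kv.2 [] (fun l => l ++ [kv.1]) else d) PySem.Dict.empty
  -- 'for _ in range(len(dc) + 1): …'
  ((List.range (dc.length + 1)).foldl
    (fun st _ => stepFrontier vals children st) ([name], (0 : Int))).2

-- ===== PRECONDITION & SPEC =====
def parentIter (dc : List (String × String)) : Nat → String → Option String
  | 0, s => some s
  | j + 1, s =>
    match (PySem.Dict.mk dc).get? s with
    | none => none
    | some p => parentIter dc j p

-- Pre_ excludes (a) association lists with duplicate keys, which no runtime Python dict can
-- present, and (b) inputs whose name lies on a parent-cycle of length ≥ 2, on which the Python A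
-- raises RecursionError (a self-loop dc[name] == name is harmless and admitted).
def Pre_countChildren (DGHs : List (String × String)) (dc : List (String × String)) (name : String) : Prop :=
  (dc.map (fun kv => kv.1)).Nodup ∧
  ((PySem.Dict.mk dc).get? name = some name ∨
    ∀ j ∈ List.range (dc.length + 1), parentIter dc (j + 1) name ≠ some name)
instance (DGHs : List (String × String)) (dc : List (String × String)) (name : String) : Decidable (Pre_countChildren DGHs dc name) := by unfold Pre_countChildren; infer_instance

def pvWitness_countChildren : (List (String × String)) × (List (String × String)) × String :=
  ([], [("a", "b"), ("c", "b")], "b")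

def Spec_countChildren (DGHs : List (String × String)) (dc : List (String × String)) (name : String) (out : Int) : Prop := out = countChildren_alt DGHs dc name
instance (DGHs : List (String × String)) (dc : List (String × String)) (name : String) (out : Int) : Decidable (Spec_countChildren DGHs dc name out) := by unfold Spec_countChildren; infer_instance

-- ===== CLAIM (what is proved, stated in full; the proofs are below) =====
def Claim_equal_countChildren : Prop := ∀ (DGHs : List (String × String)) (dc : List (String × String)) (name : String), Dom_countChildren DGHs dc name → Pre_countChildren DGHs dc name → Spec_countChildren DGHs dc name (countChildren DGHs dc name)

-- ===== LEMMAS AND PROOFS =====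

theorem pvWitness_ok :
    Dom_countChildren pvWitness_countChildren.1 pvWitness_countChildren.2.1 pvWitness_countChildren.2.2 ∧
    Pre_countChildren pvWitness_countChildren.1 pvWitness_countChildren.2.1 pvWitness_countChildren.2.2 := by
  decide

-- the two child tests agree pointwise
theorem childTest_eq (name : String) (kv : String × String) :
    (kv.2 == name && name != kv.1) = (kv.1 != kv.2 && kv.2 == name) := by
  by_cases h : kv.2 = name
  · subst h
    by_cases h1 : kv.1 = kv.2 <;> simp [bne, h1, eq_comm]
  · have h2 : (kv.2 == name) = false := beq_eq_false_iff_ne.mpr h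
    simp [h2]

-- A's chls list, characterised (needs unique keys so that dc[k] is the pair's value)
theorem chls_eq (dc : List (String × String)) (name : String)
    (hnd : (dc.map (fun kv => kv.1)).Nodup) :
    (dc.map (fun kv => kv.1)).foldl
      (fun acc k =>
        if (PySem.Dict.mk dc).getD k "" == name && name != k then acc ++ [k] else acc) []
    = (dc.filter (fun kv => kv.1 != kv.2 && kv.2 == name)).map (fun kv => kv.1) := by
  rw [PySem.List.foldl_append_if_eq_filter, List.filter_map]
  have hf : List.filter ((fun k => (PySem.Dict.mk dc).getD k "" == name && name != k) ∘ fun kv => kv.1) dc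
      = List.filter (fun kv => kv.1 != kv.2 && kv.2 == name) dc := by
    apply List.filter_congr
    intro kv hkv
    have hv : (PySem.Dict.mk dc).getD kv.1 "" = kv.2 :=
      PySem.Dict.getD_of_mem_items (d := PySem.Dict.mk dc) hkv hnd ""
    simp only [Function.comp_apply, hv]
    exact childTest_eq name kv
  simp [hf]

-- B's guarded build loop is the plain modify loop over the swapped, filtered pairs
theorem build_eq_plain (dc : List (String × String)) (d : PySem.Dict String (List String)) :
    dc.foldl (fun d kv =>
        if kv.1 != kv.2 then d.modify kv.2 [] (fun l => l ++ [kv.1]) else d) d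
    = ((dc.filter (fun kv => kv.1 != kv.2)).map (fun kv => (kv.2, kv.1))).foldl
        (fun d p => d.modify p.1 [] (fun l => l ++ [p.2])) d := by
  induction dc generalizing d with
  | nil => rfl
  | cons kv rest ih =>
    simp only [List.foldl_cons, List.filter_cons]
    by_cases h : (kv.1 != kv.2) = true
    · rw [if_pos h, if_pos h, List.map_cons, List.foldl_cons, ih]
    · rw [if_neg h, if_neg h, ih]

-- B's adjacency lookup, characterised
theorem children_getD (dc : List (String × String)) (name : String) :
    (dc.foldl (fun d kv =>
        if kv.1 != kv.2 then d.modify kv.2 [] (fun l => l ++ [kv.1]) else d)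
        PySem.Dict.empty).getD name []
    = (dc.filter (fun kv => kv.1 != kv.2 && kv.2 == name)).map (fun kv => kv.1) := by
  rw [build_eq_plain, PySem.Dict.getD_foldl_modify_append]
  have hc : (fun (a : String × String) => a.2 == name && a.1 != a.2)
      = (fun kv => kv.1 != kv.2 && kv.2 == name) := by
    funext a; rw [Bool.and_comm]
  simp [List.filter_map, List.filter_filter, Function.comp_def, hc]

-- the leaf tests agree
theorem leaf_eq (dc : List (String × String)) (n : String) :
    isLeaf n dc = ! PySem.Set.contains (PySem.Set.ofList (dc.map (fun kv => kv.2))) n := by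
  unfold isLeaf
  congr 1
  rw [Bool.eq_iff_iff, List.contains_iff_mem,
      PySem.Set.contains_iff (PySem.Set.ofList (dc.map (fun kv => kv.2))) n,
      PySem.Set.mem_ofList]

-- a fold whose step ignores the list element is an iterate
theorem foldl_const {α β : Type} (F : β → β) (l : List α) (st : β) :
    l.foldl (fun st _ => F st) st = F^[l.length] st := by
  induction l generalizing st with
  | nil => rfl
  | cons x xs ih => simp [List.foldl_cons, ih, Function.iterate_succ_apply]

-- one level of B's loop, characterised
theorem step_char (vals : PySem.Set String) (children : PySem.Dict String (List String)) :
    ∀ (fr : List String) (a1 : List String) (t : Int),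
      fr.foldl (fun acc n =>
          if ! PySem.Set.contains vals n then (acc.1, acc.2 + 1)
          else (acc.1 ++ children.getD n [], acc.2)) (a1, t)
      = (a1 ++ fr.flatMap (fun n => if ! PySem.Set.contains vals n then [] else children.getD n []),
         t + (fr.map (fun n => if ! PySem.Set.contains vals n then (1 : Int) else 0)).sum) := by
  intro fr
  induction fr with
  | nil => intro a1 t; simp
  | cons n fr ih =>
    intro a1 t
    by_cases h : (! PySem.Set.contains vals n) = true
    · simp only [List.foldl_cons, ih, List.flatMap_cons, List.map_cons, List.sum_cons,
        if_pos h, Prod.mk.injEq]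
      exact ⟨by simp, by ring⟩
    · simp only [List.foldl_cons, ih, List.flatMap_cons, List.map_cons, List.sum_cons,
        if_neg h, Prod.mk.injEq]
      exact ⟨by simp, by ring⟩

-- one level of the frontier equals one step of fuel, summed (needs unique keys)
theorem level_sum_eq (DGHs dc : List (String × String))
    (hnd : (dc.map (fun kv => kv.1)).Nodup) (f : Nat) :
    ∀ (fr : List String),
      (fr.map (fun n => if ! PySem.Set.contains (PySem.Set.ofList (dc.map (fun kv => kv.2))) n then (1 : Int) else 0)).sum
      + ((fr.flatMap (fun n =>
            if ! PySem.Set.contains (PySem.Set.ofList (dc.map (fun kv => kv.2))) n then []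
            else (dc.foldl (fun d kv =>
              if kv.1 != kv.2 then d.modify kv.2 [] (fun l => l ++ [kv.1]) else d)
              PySem.Dict.empty).getD n [])).map (countChildrenFuel DGHs dc f)).sum
      = (fr.map (countChildrenFuel DGHs dc (f + 1))).sum := by
  intro fr
  induction fr with
  | nil => simp
  | cons n fr ih =>
    simp only [List.map_cons, List.sum_cons, List.flatMap_cons, List.map_append, List.sum_append]
    rw [← ih]
    have hA : countChildrenFuel DGHs dc (f + 1) n
        = if isLeaf n dc then 1
          else (((dc.filter (fun kv => kv.1 != kv.2 && kv.2 == n)).map (fun kv => kv.1)).map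
            (countChildrenFuel DGHs dc f)).sum := by
      rw [countChildrenFuel]
      by_cases h : isLeaf n dc = true
      · rw [if_pos h, if_pos h]
      · rw [if_neg h, if_neg h]
        rw [chls_eq dc n hnd]
        simp only [PySem.List.foldl_add]
        ring
    by_cases h : isLeaf n dc = true
    · have h' : (! PySem.Set.contains (PySem.Set.ofList (dc.map (fun kv => kv.2))) n) = true := by
        rw [← leaf_eq]; exact h
      rw [hA, if_pos h, if_pos h', if_pos h']
      simp; ring
    · have h' : (! PySem.Set.contains (PySem.Set.ofList (dc.map (fun kv => kv.2))) n) = false := by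
        rw [← leaf_eq]; simpa using h
      rw [hA, if_neg h,
        if_neg (by rw [h']; exact Bool.false_ne_true),
        if_neg (by rw [h']; exact Bool.false_ne_true), children_getD]
      ring

-- main invariant: the total after f frontier levels is the sum of fuel-f counts
theorem iter_eq (DGHs dc : List (String × String))
    (hnd : (dc.map (fun kv => kv.1)).Nodup) :
    ∀ (f : Nat) (fr : List String) (t : Int),
      ((stepFrontier (PySem.Set.ofList (dc.map (fun kv => kv.2)))
          (dc.foldl (fun d kv =>
            if kv.1 != kv.2 then d.modify kv.2 [] (fun l => l ++ [kv.1]) else d)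
            PySem.Dict.empty))^[f] (fr, t)).2
      = t + (fr.map (countChildrenFuel DGHs dc f)).sum := by
  intro f
  induction f with
  | zero =>
    intro fr t
    simp [Function.iterate_zero, countChildrenFuel]
  | succ f ih =>
    intro fr t
    rw [Function.iterate_succ_apply]
    have hstep : stepFrontier (PySem.Set.ofList (dc.map (fun kv => kv.2)))
        (dc.foldl (fun d kv =>
          if kv.1 != kv.2 then d.modify kv.2 [] (fun l => l ++ [kv.1]) else d)
          PySem.Dict.empty) (fr, t)
      = (fr.flatMap (fun n =>
            if ! PySem.Set.contains (PySem.Set.ofList (dc.map (fun kv => kv.2))) n then []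
            else (dc.foldl (fun d kv =>
              if kv.1 != kv.2 then d.modify kv.2 [] (fun l => l ++ [kv.1]) else d)
              PySem.Dict.empty).getD n []),
         t + (fr.map (fun n => if ! PySem.Set.contains (PySem.Set.ofList (dc.map (fun kv => kv.2))) n then (1 : Int) else 0)).sum) := by
      unfold stepFrontier
      rw [step_char]
      simp
    rw [hstep, ih]
    rw [← level_sum_eq DGHs dc hnd f fr]
    ring

-- ===== VERDICT (by name: the statement is the Claim_ definition above) =====
theorem countChildren_spec : Claim_equal_countChildren := by
  intro DGHs dc name _ hpre
  unfold Spec_countChildren countChildren countChildren_alt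
  show countChildrenFuel DGHs dc (dc.length + 1) name
    = ((List.range (dc.length + 1)).foldl
        (fun st _ => stepFrontier (PySem.Set.ofList (dc.map (fun kv => kv.2)))
          (dc.foldl (fun d kv =>
            if kv.1 != kv.2 then d.modify kv.2 [] (fun l => l ++ [kv.1]) else d)
            PySem.Dict.empty) st) ([name], (0 : Int))).2
  rw [foldl_const, List.length_range,
    iter_eq DGHs dc hpre.1 (dc.length + 1) [name] 0]
  simp
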